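-- pv_equiv track=rewrite | github.com/muitiiifruckt/python | Laba_1.py | init_table
-- ===== SOURCE A (Python) =====
-- def init_table(A, c, b): # возвращает чисто таблицу без дельта
--     ind_bas = []
--     A_col = [[A[i][j] for i in range(len(A))] for j in range(len(A[0]))]
--     for i in range(len(b)):
--         basis = list()
--         for j in range(len(b)):# ген баз
--             basis.append(1 if i==j else 0)
--         for k in range(len(A_col)):# находим базис и индекс
--             if basis == A_col[k]:
--                 ind_bas.append(k+1)
--     # получили индексы базисов по порядку, строим таблицу
--     table = ind_bas.copy() # индексы базиса в итоговую таблицу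
--     for i in range(len(table)):
--         table[i]= [table[i],c[table[i]-1]]# добавл cb
--         table[i].append(b[i]) #  P0
--     for i in range(len(table)): #добавл все что после P0
--         for j in range(len(A[0])):
--             table[i].append(A[i][j])
--     return table
-- ===== SOURCE B (Python) =====
-- def _unit_pos(col):
--     # single pass: position of the unique 1 if col is a 0/1 unit column, else None
--     pos = None
--     for i, v in enumerate(col):
--         if v == 1:
--             if pos is not None:
--                 return None
--             pos = i
--         elif v != 0:
--             return None
--     return pos
--
--
-- def init_table(A, c, b):
--     # Classify each column once (where is its single 1?) and bucket the column
--     # index by that position; no unit vectors are built or compared.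
--     m = len(b)
--     ncols = len(A[0]) if A else 0
--     buckets = [[] for _ in range(m)]
--     if len(A) == m:  # a column can only be a length-m unit vector if A has m rows
--         for k in range(ncols):
--             p = _unit_pos([row[k] for row in A])
--             if p is not None:
--                 buckets[p].append(k + 1)
--     rows = []
--     i = 0
--     for bucket in buckets:
--         for idx in bucket:
--             rows.append([idx, c[idx - 1], b[i]] + A[i][:ncols])
--             i += 1
--     return rows
-- ===== Notes on version B (the rewrite author's own statement) =====
-- stated objective: faster
-- what changed: A generates every length-m unit vector and compares it against every column of A; B never builds or compares unit vectors: it classifies each column in a single pass (finding the position of its unique 1 and rejecting any other nonzero entry), buckets the 1-based column index under that position, and concatenates the buckets in order.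
import Mathlib
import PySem

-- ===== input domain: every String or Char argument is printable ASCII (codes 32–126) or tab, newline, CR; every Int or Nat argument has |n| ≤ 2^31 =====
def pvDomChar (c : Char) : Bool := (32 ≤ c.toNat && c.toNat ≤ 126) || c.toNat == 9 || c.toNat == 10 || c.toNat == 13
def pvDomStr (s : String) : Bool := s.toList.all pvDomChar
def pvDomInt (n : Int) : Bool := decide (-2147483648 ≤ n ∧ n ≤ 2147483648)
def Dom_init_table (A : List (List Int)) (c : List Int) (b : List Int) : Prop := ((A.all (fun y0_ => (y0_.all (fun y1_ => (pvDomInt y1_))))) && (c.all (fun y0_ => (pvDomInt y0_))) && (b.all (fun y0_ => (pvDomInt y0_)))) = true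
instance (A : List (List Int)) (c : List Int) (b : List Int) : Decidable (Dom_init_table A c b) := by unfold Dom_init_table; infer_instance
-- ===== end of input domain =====

-- B classifies each column in one pass (position of its single 1, rejecting other
-- nonzeros) and buckets column indices by that position; A instead builds every
-- unit vector and compares it against every column (objective: faster).

-- ===== PORT A =====
def init_table (A : List (List Int)) (c : List Int) (b : List Int) : List (List Int) :=
  let A_col : List (List Int) :=
    (List.range (PySem.List.pyGetD A 0 []).length).map (fun (j : Nat) =>
      (List.range A.length).map (fun (i : Nat) =>
        PySem.List.pyGetD (PySem.List.pyGetD A (i : Int) []) (j : Int) 0))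
  let ind_bas : List Int :=
    (List.range b.length).foldl (fun acc i =>
      let basis : List Int :=
        (List.range b.length).foldl (fun bs j => bs ++ [if i = j then (1 : Int) else 0]) []
      (List.range A_col.length).foldl (fun acc2 (k : Nat) =>
        if basis == PySem.List.pyGetD A_col (k : Int) [] then acc2 ++ [(k : Int) + 1]
        else acc2) acc) []
  let table1 : List (List Int) :=
    (List.range ind_bas.length).map (fun (i : Nat) =>
      let v := PySem.List.pyGetD ind_bas (i : Int) 0
      [v, PySem.List.pyGetD c (v - 1) 0, PySem.List.pyGetD b (i : Int) 0])
  (List.range table1.length).map (fun (i : Nat) =>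
    PySem.List.pyGetD table1 (i : Int) [] ++
      (List.range (PySem.List.pyGetD A 0 []).length).map (fun (j : Nat) =>
        PySem.List.pyGetD (PySem.List.pyGetD A (i : Int) []) (j : Int) 0))

-- ===== PORT B =====
-- _unit_pos: one pass over the column; pos is None until the single 1 is seen
-- (Python's None sentinel is Option.none; the enumerate counter is the Nat index i)
def pvUnitPosGo : List Int → Nat → Option Nat → Option Nat
  | [], _, pos => pos
  | v :: t, i, pos =>
      if v = 1 then
        (match pos with
         | some _ => none
         | none => pvUnitPosGo t (i + 1) (some i))
      else if v = 0 then pvUnitPosGo t (i + 1) pos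
      else none

def init_table_alt (A : List (List Int)) (c : List Int) (b : List Int) : List (List Int) :=
  let m : Nat := b.length
  let ncols : Nat := match A with | [] => 0 | r :: _ => r.length
  let buckets0 : List (List Int) := List.replicate m []
  let buckets : List (List Int) :=
    if A.length = m then
      (List.range ncols).foldl (fun bs (k : Nat) =>
        match pvUnitPosGo (A.map (fun row => PySem.List.pyGetD row (k : Int) 0)) 0 none with
        | some p => bs.set p (bs.getD p [] ++ [(k : Int) + 1])
        | none => bs) buckets0
    else buckets0
  -- final loop: manual counter i over the bucketed indices; A[i][:ncols] is slice
  (buckets.foldl (fun (st : Nat × List (List Int)) bucket =>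
      bucket.foldl (fun st2 idx =>
        (st2.1 + 1,
         st2.2 ++ [[idx, PySem.List.pyGetD c (idx - 1) 0, PySem.List.pyGetD b (st2.1 : Int) 0]
           ++ PySem.List.slice (PySem.List.pyGetD A (st2.1 : Int) []) none (some (ncols : Int))]))
        st) ((0 : Nat), ([] : List (List Int)))).2

-- ===== PRECONDITION & SPEC =====
-- spec-level data used only to state where A raises: the columns of A, the i-th unit
-- vector, and the ordered list of 1-based indices of columns that are unit vectors
def pvCols (A : List (List Int)) : List (List Int) :=
  (List.range A.headI.length).map (fun (j : Nat) => A.map (fun r => r.getD j 0))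
def pvUnit (m i : Nat) : List Int := (List.range m).map (fun j => if j = i then (1 : Int) else 0)
def pvMatched (A : List (List Int)) (b : List Int) : List Nat :=
  (List.range b.length).flatMap (fun i =>
    ((List.range (pvCols A).length).filter
      (fun k => (pvCols A).getD k [] == pvUnit b.length i)).map (fun k => k + 1))

-- Pre_ excludes exactly the inputs where Python A raises IndexError: empty A (len(A[0])),
-- a row shorter than row 0 (A[i][j]), a matched basis index beyond c (c[k-1]), or more
-- matched basis columns than entries of b / rows of A (b[i] / A[i]).
def Pre_init_table (A : List (List Int)) (c : List Int) (b : List Int) : Prop :=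
  A ≠ [] ∧ (∀ r ∈ A, A.headI.length ≤ r.length) ∧
  (∀ k ∈ pvMatched A b, k ≤ c.length) ∧
  (pvMatched A b).length ≤ b.length ∧ (pvMatched A b).length ≤ A.length
instance (A : List (List Int)) (c : List Int) (b : List Int) : Decidable (Pre_init_table A c b) := by
  unfold Pre_init_table; infer_instance

def pvWitness_init_table : List (List Int) × List Int × List Int :=
  ([[1, 0], [0, 1]], [3, 4], [5, 6])

def Spec_init_table (A : List (List Int)) (c : List Int) (b : List Int) (out : List (List Int)) : Prop := out = init_table_alt A c b
instance (A : List (List Int)) (c : List Int) (b : List Int) (out : List (List Int)) : Decidable (Spec_init_table A c b out) := by unfold Spec_init_table; infer_instance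

-- ===== CLAIM (what is proved, stated in full; the proofs are below) =====
def Claim_equal_init_table : Prop := ∀ (A : List (List Int)) (c : List Int) (b : List Int), Dom_init_table A c b → Pre_init_table A c b → Spec_init_table A c b (init_table A c b)

-- ===== LEMMAS AND PROOFS =====

-- the Int-valued list both ports effectively build as the ordered basis indices
def pvInd (A : List (List Int)) (b : List Int) : List Int :=
  (pvMatched A b).map (fun (k : Nat) => (k : Int))

theorem pvHeadI (A : List (List Int)) : PySem.List.pyGetD A 0 [] = A.headI := by
  cases A <;> simp [PySem.List.pyGetD, PySem.List.pyGet?, PySem.List.pyIdx?] <;> rfl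

theorem mapIdx_eq_map {α β : Type} (l : List α) (f : α → β) (d : α) :
    (List.range l.length).map (fun i => f (l.getD i d)) = l.map f := by
  apply List.ext_getElem
  · simp
  · intro i h1 h2
    simp only [List.length_map, List.length_range] at h1
    simp [List.getD_eq_getElem?_getD, List.getElem?_eq_getElem h1]

theorem takeEq (row : List Int) (N : Nat) (h : N ≤ row.length) :
    (List.range N).map (fun (j : Nat) => row.getD j 0) = row.take N := by
  apply List.ext_getElem
  · simp [h]
  · intro i h1 h2
    simp only [List.length_map, List.length_range] at h1
    simp [List.getD_eq_getElem?_getD, List.getElem?_eq_getElem (Nat.lt_of_lt_of_le h1 h),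
      List.getElem_take]

theorem ind_eq (A : List (List Int)) (b : List Int) :
    (List.range b.length).flatMap (fun i =>
      ((List.range (pvCols A).length).filter
        (fun k => (pvCols A).getD k [] == pvUnit b.length i)).map (fun (k : Nat) => (k : Int) + 1))
    = pvInd A b := by
  simp [pvInd, pvMatched, List.map_flatMap, List.map_map, Function.comp_def]

theorem pvInd_nil (A : List (List Int)) (b : List Int) (hm : A.length ≠ b.length) :
    pvInd A b = [] := by
  have hmat : pvMatched A b = [] := by
    unfold pvMatched
    apply List.flatMap_eq_nil_iff.mpr
    intro i _
    rw [List.map_eq_nil_iff, List.filter_eq_nil_iff]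
    intro k hk
    rw [List.mem_range] at hk
    intro hbeq
    apply hm
    have hcol : (pvCols A).getD k [] = A.map (fun r => r.getD k 0) := by
      unfold pvCols at hk ⊢
      rw [List.length_map, List.length_range] at hk
      exact PySem.List.getD_map_range _ _ _ _ hk
    have := congrArg List.length (eq_of_beq hbeq)
    rw [hcol] at this
    simpa [pvUnit] using this
  simp [pvInd, hmat]

theorem lemA (A : List (List Int)) (c : List Int) (b : List Int) :
    init_table A c b = (List.range (pvInd A b).length).map (fun (i : Nat) =>
      [(pvInd A b).getD i 0, PySem.List.pyGetD c ((pvInd A b).getD i 0 - 1) 0, b.getD i 0] ++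
      (List.range A.headI.length).map (fun (j : Nat) => (A.getD i []).getD j 0)) := by
  unfold init_table
  simp only [pvHeadI, PySem.List.pyGetD_natCast, PySem.List.foldl_append_singleton_eq_map,
    List.nil_append]
  have hcol : (List.range A.headI.length).map (fun (j : Nat) =>
      (List.range A.length).map (fun (i : Nat) => (A.getD i []).getD j 0)) = pvCols A := by
    unfold pvCols
    apply List.map_congr_left
    intro j _
    exact mapIdx_eq_map A (fun r => r.getD j 0) []
  rw [hcol]
  have hbasis : ∀ i : Nat, (List.range b.length).map (fun j => if i = j then (1 : Int) else 0)
      = pvUnit b.length i := by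
    intro i
    apply List.map_congr_left
    intro j _
    by_cases h : i = j
    · subst h; simp
    · simp [h, Ne.symm h]
  simp only [hbasis]
  simp only [PySem.List.foldl_append_if]
  have hflip : ∀ i : Nat, (List.range (pvCols A).length).filter
      (fun k => pvUnit b.length i == (pvCols A).getD k [])
      = (List.range (pvCols A).length).filter
      (fun k => (pvCols A).getD k [] == pvUnit b.length i) := by
    intro i
    apply List.filter_congr
    intro k _
    rw [Bool.beq_comm]
  simp only [hflip]
  simp only [PySem.List.foldl_append_eq_flatMap, List.nil_append]
  rw [ind_eq]
  simp only [List.length_map, List.length_range]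
  apply List.map_congr_left
  intro i hi
  rw [List.mem_range] at hi
  rw [PySem.List.getD_map_range _ _ _ _ hi]


-- unfolding lemmas for pvUnitPosGo on literal heads
theorem go_cons_one (t : List Int) (i : Nat) :
    pvUnitPosGo ((1 : Int) :: t) i none = pvUnitPosGo t (i + 1) (some i) := by
  simp [pvUnitPosGo]

theorem go_cons_one_some (t : List Int) (i p : Nat) :
    pvUnitPosGo ((1 : Int) :: t) i (some p) = none := by
  simp [pvUnitPosGo]

theorem go_cons_zero (t : List Int) (i : Nat) (pos : Option Nat) :
    pvUnitPosGo ((0 : Int) :: t) i pos = pvUnitPosGo t (i + 1) pos := by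
  norm_num [pvUnitPosGo]

theorem go_cons_other (v : Int) (t : List Int) (i : Nat) (pos : Option Nat)
    (h1 : v ≠ 1) (h0 : v ≠ 0) : pvUnitPosGo (v :: t) i pos = none := by
  simp [pvUnitPosGo, h1, h0]

-- pvUnitPosGo with a recorded position: succeeds (returning it) iff the rest is all zeros
theorem go_some (col : List Int) (s p : Nat) :
    pvUnitPosGo col s (some p) = if col.all (· == 0) then some p else none := by
  induction col generalizing s with
  | nil => simp [pvUnitPosGo]
  | cons v t ih =>
    by_cases h1 : v = 1
    · subst h1; rw [go_cons_one_some]; simp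
    · by_cases h0 : v = 0
      · subst h0; rw [go_cons_zero, ih]; simp
      · rw [go_cons_other v t s (some p) h1 h0]
        simp [h0]

-- shifting the start index shifts the recorded position
theorem go_shift (col : List Int) (s : Nat) :
    pvUnitPosGo col (s + 1) none = (pvUnitPosGo col s none).map (· + 1) := by
  induction col generalizing s with
  | nil => simp [pvUnitPosGo]
  | cons v t ih =>
    by_cases h1 : v = 1
    · subst h1
      rw [go_cons_one, go_cons_one, go_some, go_some]
      by_cases hz : t.all (· == 0) <;> simp [hz]
    · by_cases h0 : v = 0
      · subst h0; rw [go_cons_zero, go_cons_zero, ih]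
      · rw [go_cons_other v t (s + 1) none h1 h0, go_cons_other v t s none h1 h0]
        rfl

theorem go_bound (col : List Int) (s q : Nat) (h : pvUnitPosGo col s none = some q) :
    s ≤ q ∧ q < s + col.length := by
  induction col generalizing s with
  | nil => simp [pvUnitPosGo] at h
  | cons v t ih =>
    by_cases h1 : v = 1
    · subst h1
      rw [go_cons_one, go_some] at h
      by_cases hz : t.all (· == 0)
      · rw [if_pos hz] at h
        have := Option.some.inj h
        subst this
        exact ⟨le_refl s, by simp⟩
      · rw [if_neg hz] at h; cases h
    · by_cases h0 : v = 0
      · subst h0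
        rw [go_cons_zero] at h
        obtain ⟨l, r⟩ := ih (s + 1) h
        refine ⟨by omega, by simp only [List.length_cons]; omega⟩
      · rw [go_cons_other v t s none h1 h0] at h; cases h

-- all-zero suffix characterizes equality with a replicate of zeros
theorem allzero_eq (t : List Int) : (t.all (· == 0)) = (t == List.replicate t.length 0) := by
  induction t with
  | nil => rfl
  | cons v u ih => simp [List.replicate_succ, ih, Bool.beq_comm (a := v)]

theorem unit_zero (n : Nat) : pvUnit (n + 1) 0 = (1 : Int) :: List.replicate n 0 := by
  apply List.ext_getElem
  · simp [pvUnit]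
  · intro j hj _
    rcases j with _ | j
    · simp [pvUnit]
    · simp [pvUnit, List.getElem_replicate]

theorem unit_succ (n i : Nat) : pvUnit (n + 1) (i + 1) = (0 : Int) :: pvUnit n i := by
  apply List.ext_getElem
  · simp [pvUnit]
  · intro j hj _
    rcases j with _ | j
    · simp [pvUnit]
    · simp [pvUnit]

-- the key characterization: a column equals the i-th unit vector of its own length
-- iff the single-pass classifier returns position i (for i within the length)
theorem unit_char (col : List Int) (i : Nat) (hi : i < col.length) :
    (col = pvUnit col.length i) ↔ pvUnitPosGo col 0 none = some i := by
  induction col generalizing i with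
  | nil => simp at hi
  | cons v t ih =>
    by_cases h1 : v = 1
    · subst h1
      rw [go_cons_one, go_some]
      cases i with
      | zero =>
        rw [List.length_cons, unit_zero]
        constructor
        · intro h
          have ht : t = List.replicate t.length 0 := by injection h
          have : (t.all (· == 0)) = true := by rw [allzero_eq]; exact beq_iff_eq.mpr ht
          simp [this]
        · intro h
          by_cases hz : t.all (· == 0)
          · rw [allzero_eq] at hz
            rw [beq_iff_eq.mp hz]
            simp
          · rw [if_neg hz] at h; cases h
      | succ i' =>
        rw [List.length_cons, unit_succ]
        constructor
        · intro h; injection h with h _; cases h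
        · intro h
          by_cases hz : t.all (· == 0)
          · rw [if_pos hz] at h
            exact absurd (Option.some.inj h) (by omega)
          · rw [if_neg hz] at h; cases h
    · by_cases h0 : v = 0
      · subst h0
        rw [go_cons_zero, show (0 + 1 : Nat) = 0 + 1 from rfl, go_shift]
        cases i with
        | zero =>
          rw [List.length_cons, unit_zero]
          constructor
          · intro h; injection h with h _; cases h
          · intro h
            rw [Option.map_eq_some_iff] at h
            obtain ⟨a, _, ha⟩ := h
            omega
        | succ i' =>
          rw [List.length_cons, unit_succ]
          have hi' : i' < t.length := by simpa using hi
          constructor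
          · intro h
            have ht : t = pvUnit t.length i' := by injection h
            rw [(ih i' hi').mp ht]
            rfl
          · intro h
            rw [Option.map_eq_some_iff] at h
            obtain ⟨a, ha, hae⟩ := h
            have haa : a = i' := by omega
            rw [haa] at ha
            rw [(ih i' hi').mpr ha]
            simp [pvUnit]
      · rw [go_cons_other v t 0 none h1 h0]
        cases i with
        | zero =>
          rw [List.length_cons, unit_zero]
          constructor
          · intro h; injection h with h _; exact absurd h h1
          · intro h; cases h
        | succ i' =>
          rw [List.length_cons, unit_succ]
          constructor
          · intro h; injection h with h _; exact absurd h h0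
          · intro h; cases h

-- flatten over indexed buckets
theorem flatten_eq_flatMap {a : Type} (l : List (List a)) :
    l.flatten = (List.range l.length).flatMap (fun p => l.getD p []) := by
  induction l with
  | nil => rfl
  | cons x t ih =>
    rw [List.flatten_cons, ih, List.length_cons, List.range_succ_eq_map, List.flatMap_cons]
    simp only [List.getD_cons_zero]
    congr 1
    rw [List.flatMap_map]
    simp only [List.getD_cons_succ]

-- bucket invariant for B's classification fold
theorem buckets_getD (A : List (List Int)) (m : Nat) (hm : A.length = m) (n : Nat) :
    (((List.range n).foldl (fun bs (k : Nat) =>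
        match pvUnitPosGo (A.map (fun row => PySem.List.pyGetD row (k : Int) 0)) 0 none with
        | some q => bs.set q (bs.getD q [] ++ [(k : Int) + 1])
        | none => bs) (List.replicate m [])).length = m) ∧
    ∀ p : Nat,
    (((List.range n).foldl (fun bs (k : Nat) =>
        match pvUnitPosGo (A.map (fun row => PySem.List.pyGetD row (k : Int) 0)) 0 none with
        | some q => bs.set q (bs.getD q [] ++ [(k : Int) + 1])
        | none => bs) (List.replicate m [])).getD p [])
    = ((List.range n).filter (fun (k : Nat) =>
        pvUnitPosGo (A.map (fun row => PySem.List.pyGetD row (k : Int) 0)) 0 none == some p)).map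
        (fun (k : Nat) => (k : Int) + 1) := by
  induction n with
  | zero =>
    refine ⟨by simp, ?_⟩
    intro p
    simp only [List.range_zero, List.foldl_nil, List.filter_nil, List.map_nil,
      List.getD_eq_getElem?_getD, List.getElem?_replicate]
    split <;> rfl
  | succ n ih =>
    obtain ⟨ih2, ih1⟩ := ih
    simp only [List.range_succ, List.foldl_append, List.filter_append]
    simp only [List.foldl_cons, List.foldl_nil]
    cases hpos : pvUnitPosGo (A.map (fun row => PySem.List.pyGetD row ((n : Nat) : Int) 0)) 0 none with
    | none =>
      simp only [hpos]
      refine ⟨ih2, ?_⟩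
      intro p
      have hpred : ((pvUnitPosGo (A.map (fun row => PySem.List.pyGetD row ((n : Nat) : Int) 0))
          0 none == some p) : Bool) = false := by rw [hpos]; rfl
      simp only [List.filter_cons, List.filter_nil, hpred, Bool.false_eq_true, if_false,
        List.append_nil]
      exact ih1 p
    | some q =>
      have hqm : q < m := by
        have := (go_bound _ 0 q hpos).2
        simp at this
        omega
      simp only [hpos]
      refine ⟨by rw [List.length_set]; exact ih2, ?_⟩
      intro p
      by_cases hpq : p = q
      · subst hpq
        rw [List.getD_eq_getElem?_getD, List.getElem?_set_self (by rw [ih2]; exact hqm),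
          Option.getD_some]
        rw [List.map_append, ih1 p]
        congr 1
        have hpred : ((pvUnitPosGo (A.map (fun row => PySem.List.pyGetD row ((n : Nat) : Int) 0))
            0 none == some p) : Bool) = true := by rw [hpos]; simp
        simp only [List.filter_cons, List.filter_nil, hpred, if_true, List.map_cons, List.map_nil]
      · rw [List.getD_eq_getElem?_getD, List.getElem?_set_ne (fun h => hpq h.symm),
          ← List.getD_eq_getElem?_getD]
        have hpred : ((pvUnitPosGo (A.map (fun row => PySem.List.pyGetD row ((n : Nat) : Int) 0))
            0 none == some p) : Bool) = false := by
          rw [hpos]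
          simp
          omega
        rw [List.map_append]
        simp only [List.filter_cons, List.filter_nil, hpred, Bool.false_eq_true, if_false,
          List.map_nil, List.append_nil]
        exact ih1 p

-- the counter-carrying fold of B's final loop, over a flat list
theorem counter_fold (g : Nat → Int → List Int) (l : List Int) (i : Nat) (acc : List (List Int)) :
    (l.foldl (fun (st : Nat × List (List Int)) idx => (st.1 + 1, st.2 ++ [g st.1 idx])) (i, acc))
    = (i + l.length, acc ++ (List.range l.length).map (fun j => g (i + j) (l.getD j 0))) := by
  induction l generalizing i acc with
  | nil => simp
  | cons x t ih =>
    rw [List.foldl_cons, ih, List.length_cons, List.range_succ_eq_map]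
    congr 1
    · omega
    · rw [List.append_assoc]
      congr 1
      simp only [List.map_cons, List.map_map, List.getD_cons_zero, Nat.add_zero,
        List.singleton_append]
      congr 1
      apply List.map_congr_left
      intro j _
      simp only [Function.comp_def, List.getD_cons_succ]
      congr 1
      omega

theorem lemB (A : List (List Int)) (c : List Int) (b : List Int) :
    init_table_alt A c b = (List.range (pvInd A b).length).map (fun (i : Nat) =>
      [(pvInd A b).getD i 0, PySem.List.pyGetD c ((pvInd A b).getD i 0 - 1) 0, b.getD i 0] ++
      (A.getD i []).take A.headI.length) := by
  unfold init_table_alt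
  have hncols : (match A with | [] => 0 | r :: _ => r.length) = A.headI.length := by
    cases A <;> rfl
  simp only [hncols]
  rw [← List.foldl_flatten]
  have hflat : (if A.length = b.length then
      (List.range A.headI.length).foldl (fun bs (k : Nat) =>
        match pvUnitPosGo (A.map (fun row => PySem.List.pyGetD row (k : Int) 0)) 0 none with
        | some p => bs.set p (bs.getD p [] ++ [(k : Int) + 1])
        | none => bs) (List.replicate b.length [])
      else List.replicate b.length []).flatten = pvInd A b := by
    by_cases hm : A.length = b.length
    case neg =>
      rw [if_neg hm, pvInd_nil A b hm]
      induction b.length with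
      | zero => rfl
      | succ k ihk => simpa [List.replicate_succ] using ihk
    rw [if_pos hm]
    rw [flatten_eq_flatMap, (buckets_getD A b.length hm A.headI.length).1, ← ind_eq,
      List.flatMap_def, List.flatMap_def]
    apply congrArg List.flatten
    apply List.map_congr_left
    intro p hp
    rw [List.mem_range] at hp
    rw [(buckets_getD A b.length hm A.headI.length).2 p]
    have hcl : (pvCols A).length = A.headI.length := by simp [pvCols]
    rw [hcl]
    apply congrArg
    apply List.filter_congr
    intro k hk
    rw [List.mem_range] at hk
    have hcol : (pvCols A).getD k [] = A.map (fun r => r.getD k 0) := by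
      unfold pvCols
      exact PySem.List.getD_map_range _ _ _ _ hk
    have hmap : A.map (fun row => PySem.List.pyGetD row (k : Int) 0)
        = A.map (fun r => r.getD k 0) := by
      apply List.map_congr_left
      intro r _
      exact PySem.List.pyGetD_natCast r k 0
    have hlen : (A.map (fun r => r.getD k 0)).length = b.length := by simp [hm]
    have hchar := unit_char (A.map (fun r => r.getD k 0)) p (by rw [hlen]; exact hp)
    rw [hlen] at hchar
    rw [hmap, hcol]
    by_cases hq : pvUnitPosGo (A.map (fun r => r.getD k 0)) 0 none = some p
    · have hcoleq := hchar.mpr hq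
      rw [Bool.eq_iff_iff, beq_iff_eq, beq_iff_eq]
      exact ⟨fun _ => hcoleq, fun _ => hq⟩
    · have h2 : ¬ (A.map (fun r => r.getD k 0)) = pvUnit b.length p := fun h => hq (hchar.mp h)
      rw [Bool.eq_iff_iff, beq_iff_eq, beq_iff_eq]
      exact ⟨fun h => absurd h hq, fun h => absurd h h2⟩
  rw [hflat, counter_fold (fun i idx =>
    [idx, PySem.List.pyGetD c (idx - 1) 0, PySem.List.pyGetD b (i : Int) 0]
      ++ PySem.List.slice (PySem.List.pyGetD A (i : Int) []) none (some (A.headI.length : Int)))]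
  simp only [Nat.zero_add, List.nil_append]
  apply List.map_congr_left
  intro j hj
  rw [List.mem_range] at hj
  rw [PySem.List.pyGetD_natCast b j 0, PySem.List.pyGetD_natCast A j []]
  rw [PySem.List.slice_to_natCast]

-- ===== VERDICT (by name: the statement is the Claim_ definition above) =====
theorem init_table_spec : Claim_equal_init_table := by
  intro A c b _ hpre
  obtain ⟨hne, hrows, hc, hb, hA⟩ := hpre
  unfold Spec_init_table
  rw [lemA, lemB]
  apply List.map_congr_left
  intro i hi
  rw [List.mem_range] at hi
  congr 1
  have hiA : i < A.length := by
    have hlen : (pvInd A b).length = (pvMatched A b).length := by simp [pvInd]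
    omega
  have hrow : A.getD i [] = A[i] := List.getD_eq_getElem A [] hiA
  rw [hrow]
  exact takeEq _ _ (hrows _ (List.getElem_mem hiA))
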